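-- pv_equiv track=rewrite | github.com/ivan-ha/google-codejam | src/2018/practice/senate-evacuation/app.py | genEvacuationPlan
-- ===== SOURCE A (Python) =====
-- import heapq
--
-- def getPartyCode (index):
--   return chr(65 + index)
--
-- def isSumOdd (list):
--   listSum = sum(list)
--   return listSum % 2 != 0
--
-- def genEvacuationPlan (list):
--   evacPlan = ''
--   isFirstEvac = True
--
--   while (sum(list) > 0):
--     if (isFirstEvac and isSumOdd(list)):
--       maxValue = max(list)
--       maxIndex = list.index(maxValue)
--       list[maxIndex] -= 1
--       evacPlan += getPartyCode(maxIndex)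
--     else:
--       largestParty, secondLargestParty= heapq.nlargest(2, range(len(list)), list.__getitem__)
--       list[largestParty] -= 1
--       list[secondLargestParty] -= 1
--       evacPlan += ('' if isFirstEvac else ' ') + getPartyCode(largestParty) + getPartyCode(secondLargestParty)
--     isFirstEvac = False
--
--   return evacPlan
-- ===== SOURCE B (Python) =====
-- import bisect
--
-- def genEvacuationPlan (list):
--   s = sum(list)
--   pairs = []
--   for i, v in enumerate(list):
--     bisect.insort(pairs, (-v, i))
--   chunks = []
--   if s > 0 and s % 2 != 0:
--     negv, i = pairs.pop(0)
--     bisect.insort(pairs, (negv + 1, i))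
--     chunks.append(chr(65 + i))
--     s -= 1
--   while s > 0:
--     negv1, i1 = pairs.pop(0)
--     negv2, i2 = pairs.pop(0)
--     bisect.insort(pairs, (negv1 + 1, i1))
--     bisect.insort(pairs, (negv2 + 1, i2))
--     chunks.append(chr(65 + i1) + chr(65 + i2))
--     s -= 2
--   return ' '.join(chunks)
-- ===== Notes on version B (the rewrite author's own statement) =====
-- stated objective: alternative
-- what changed: A rescans the whole list every round (sum(), max()+list.index(), heapq.nlargest over range(len)); B computes the sum once and keeps it as a running counter, and maintains one sorted list of (-size, index) pairs built and updated with bisect.insort, popping its first two entries each round, collecting the chunks and joining them once at the end.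
import Mathlib
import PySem

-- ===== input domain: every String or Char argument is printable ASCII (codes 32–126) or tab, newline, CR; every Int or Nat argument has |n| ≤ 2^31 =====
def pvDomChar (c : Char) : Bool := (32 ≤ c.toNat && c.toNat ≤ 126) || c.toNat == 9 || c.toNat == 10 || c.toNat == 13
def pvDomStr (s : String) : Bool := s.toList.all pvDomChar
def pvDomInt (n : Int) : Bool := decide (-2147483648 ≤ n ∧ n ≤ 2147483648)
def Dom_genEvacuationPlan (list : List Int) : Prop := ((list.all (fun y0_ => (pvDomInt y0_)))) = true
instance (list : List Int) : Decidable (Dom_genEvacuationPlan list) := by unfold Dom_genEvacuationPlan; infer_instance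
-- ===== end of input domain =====

-- B replaces A's per-round sum()/max()/heapq.nlargest recomputations by a running sum
-- counter and one sorted (-size, index) list maintained with bisect.insort (objective:
-- alternative).  Equivalence is about the RETURN value only: A mutates its list
-- argument in place (decrements entries), B does not.

-- ===== PORT A =====
-- chr(65 + index); exact here: every call site passes a nonnegative in-range list index
def getPartyCode (index : Int) : String := String.singleton (Char.ofNat (65 + index).toNat)

def isSumOdd (list : List Int) : Bool := PySem.Int.mod list.sum 2 != 0

-- the while-loop of A; fuel = initial sum(list), enough since each pass lowers the sum
def genEvacLoop (fuel : Nat) (l : List Int) (evacPlan : String) (isFirstEvac : Bool) : String :=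
  match fuel with
  | 0 => evacPlan
  | fuel + 1 =>
    if l.sum > 0 then
      if isFirstEvac && isSumOdd l then
        match PySem.List.max? l (fun x => x) with
        | none => evacPlan            -- unreachable: sum(list) > 0 forces list ≠ []
        | some maxValue =>
          match PySem.List.index? l maxValue with
          | none => evacPlan          -- unreachable: maxValue ∈ list
          | some maxIndex =>
            genEvacLoop fuel
              (PySem.List.pySetD l (maxIndex : Int) (PySem.List.pyGetD l (maxIndex : Int) 0 - 1))
              (evacPlan ++ getPartyCode (maxIndex : Int)) false
      else
        -- heapq.nlargest(2, range(len(list)), list.__getitem__)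
        --   = sorted(range(len(list)), key=list.__getitem__, reverse=True)[:2]  (documented equivalence)
        match (PySem.List.sorted (PySem.List.pyRange 0 (l.length : Int))
                (fun i => PySem.List.pyGetD l i 0) true).take 2 with
        | [largestParty, secondLargestParty] =>
          genEvacLoop fuel
            (PySem.List.pySetD (PySem.List.pySetD l largestParty (PySem.List.pyGetD l largestParty 0 - 1))
              secondLargestParty
              (PySem.List.pyGetD (PySem.List.pySetD l largestParty (PySem.List.pyGetD l largestParty 0 - 1)) secondLargestParty 0 - 1))
            (evacPlan ++ ((if isFirstEvac then "" else " ") ++ getPartyCode largestParty ++ getPartyCode secondLargestParty))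
            false
        | _ => evacPlan               -- Python: ValueError unpacking fewer than 2 items (outside Pre_)
    else evacPlan

def genEvacuationPlan (list : List Int) : String :=
  genEvacLoop list.sum.toNat list "" true

-- ===== PORT B =====
-- tuple comparison (a1, a2) < (b1, b2), Python's lexicographic order on int pairs
def pairLt (a b : Int × Int) : Bool := decide (a.1 < b.1 ∨ (a.1 = b.1 ∧ a.2 < b.2))

-- bisect.insort into a sorted list; exact here: the inserted key is never already present
-- (its index component is absent), so the insertion position is unique
def insortP (x : Int × Int) : List (Int × Int) → List (Int × Int)
  | [] => [x]
  | y :: ys => if pairLt x y then x :: y :: ys else y :: insortP x ys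

-- the build loop of B: for i, v in enumerate(list): bisect.insort(pairs, (-v, i))
def altBuild (list : List Int) : List (Int × Int) :=
  (PySem.List.enumerate list).foldl (fun pairs iv => insortP (-iv.2, iv.1) pairs) []

-- the while-loop of B; fuel = current s, enough since each pass lowers s by 2
def altLoop (fuel : Nat) (pairs : List (Int × Int)) (chunks : List String) (s : Int) : List String :=
  match fuel with
  | 0 => chunks
  | fuel + 1 =>
    if s > 0 then
      match pairs with
      | (negv1, i1) :: (negv2, i2) :: rest =>
        altLoop fuel (insortP (negv2 + 1, i2) (insortP (negv1 + 1, i1) rest))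
          (chunks ++ [String.singleton (Char.ofNat (65 + i1).toNat) ++ String.singleton (Char.ofNat (65 + i2).toNat)])
          (s - 2)
      | _ => chunks                   -- Python: IndexError popping from a short list (outside Pre_)
    else chunks

def genEvacuationPlan_alt (list : List Int) : String :=
  if list.sum > 0 && PySem.Int.mod list.sum 2 != 0 then
    match altBuild list with
    | (negv, i) :: rest =>
      PySem.Str.join " " (altLoop (list.sum - 1).toNat (insortP (negv + 1, i) rest)
        [String.singleton (Char.ofNat (65 + i).toNat)] (list.sum - 1))
    | [] => ""                        -- unreachable: a positive sum forces a nonempty list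
  else
    PySem.Str.join " " (altLoop list.sum.toNat (altBuild list) [] list.sum)

-- ===== PRECONDITION & SPEC =====
-- Pre_ excludes exactly the inputs on which A raises: a list with fewer than two parties
-- whose member sum forces the loop into the two-party unpacking (ValueError there).
def Pre_genEvacuationPlan (list : List Int) : Prop := 2 ≤ list.length ∨ list.sum ≤ 1
instance (list : List Int) : Decidable (Pre_genEvacuationPlan list) := by
  unfold Pre_genEvacuationPlan; infer_instance

def pvWitness_genEvacuationPlan : List Int := [2, 3]

def Spec_genEvacuationPlan (list : List Int) (out : String) : Prop := out = genEvacuationPlan_alt list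
instance (list : List Int) (out : String) : Decidable (Spec_genEvacuationPlan list out) := by
  unfold Spec_genEvacuationPlan; infer_instance

-- ===== CLAIM (what is proved, stated in full; the proofs are below) =====
def Claim_equal_genEvacuationPlan : Prop := ∀ (list : List Int), Dom_genEvacuationPlan list → Pre_genEvacuationPlan list → Spec_genEvacuationPlan list (genEvacuationPlan list)

-- ===== LEMMAS AND PROOFS =====

-- the multiset of (-value, index) pairs of a list, in index order
def pairsOf (l : List Int) : List (Int × Int) :=
  (PySem.List.pyRange 0 (l.length : Int)).map (fun j => (-(PySem.List.pyGetD l j 0), j))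

-- the invariant tying B's sorted pair list to A's current list
def SInv (l : List Int) (pairs : List (Int × Int)) : Prop :=
  pairs.Pairwise (fun a b => pairLt a b = true) ∧ pairs.Perm (pairsOf l)

theorem pairLt_iff (a b : Int × Int) :
    pairLt a b = true ↔ (a.1 < b.1 ∨ (a.1 = b.1 ∧ a.2 < b.2)) := by
  simp [pairLt]

theorem pairLt_trans {a b c : Int × Int} (h1 : pairLt a b = true) (h2 : pairLt b c = true) :
    pairLt a c = true := by
  rw [pairLt_iff] at *; omega

theorem pairLt_asymm {a b : Int × Int} (h1 : pairLt a b = true) (h2 : pairLt b a = true) : False := by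
  rw [pairLt_iff] at *; omega

theorem pairLt_total {a b : Int × Int} (h : a ≠ b) : pairLt a b = true ∨ pairLt b a = true := by
  rcases a with ⟨a1, a2⟩; rcases b with ⟨b1, b2⟩
  rw [pairLt_iff, pairLt_iff]
  have h2 : a1 ≠ b1 ∨ a2 ≠ b2 := by
    rcases eq_or_ne a1 b1 with h1 | h1
    · rcases eq_or_ne a2 b2 with h3 | h3
      · exact absurd (by rw [h1, h3]) h
      · exact Or.inr h3
    · exact Or.inl h1
  dsimp only
  omega

theorem insortP_perm (x : Int × Int) (ys : List (Int × Int)) : (insortP x ys).Perm (x :: ys) := by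
  induction ys with
  | nil => simp [insortP]
  | cons y ys ih =>
    simp only [insortP]
    split
    · exact List.Perm.refl _
    · exact ((ih.cons y).trans (List.Perm.swap x y ys))

theorem insortP_pairwise (x : Int × Int) (ys : List (Int × Int))
    (h : ys.Pairwise (fun a b => pairLt a b = true)) (hne : ∀ y ∈ ys, y ≠ x) :
    (insortP x ys).Pairwise (fun a b => pairLt a b = true) := by
  induction ys with
  | nil => simp [insortP]
  | cons y ys ih =>
    rcases List.pairwise_cons.mp h with ⟨hy, hys⟩
    simp only [insortP]
    split
    · rename_i hxy
      refine List.pairwise_cons.mpr ⟨?_, h⟩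
      intro z hz
      rcases List.mem_cons.mp hz with hz | hz
      · subst hz; exact hxy
      · exact pairLt_trans hxy (hy z hz)
    · rename_i hxy
      have hyx : pairLt y x = true := by
        rcases pairLt_total (Ne.symm (hne y (by simp))) with h' | h'
        · exact absurd h' hxy
        · exact h'
      refine List.pairwise_cons.mpr ⟨?_, ih hys (fun z hz => hne z (by simp [hz]))⟩
      intro z hz
      have := (insortP_perm x ys).mem_iff.mp hz
      rcases List.mem_cons.mp this with hz | hz
      · subst hz; exact hyx
      · exact hy z hz

theorem pairwise_perm_eq {α : Type} {r : α → α → Prop} (hasymm : ∀ a b, r a b → r b a → False)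
    {xs ys : List α} (hp : xs.Perm ys) (h1 : xs.Pairwise r) (h2 : ys.Pairwise r) : xs = ys :=
  List.Perm.eq_of_pairwise (fun a b _ _ hab hba => (hasymm a b hab hba).elim) h1 h2 hp

-- membership in pairsOf
theorem mem_pairsOf {l : List Int} {p : Int × Int} (h : p ∈ pairsOf l) :
    0 ≤ p.2 ∧ p.2 < (l.length : Int) ∧ p.1 = -(PySem.List.pyGetD l p.2 0) := by
  rcases List.mem_map.mp h with ⟨j, hj, hpj⟩
  rcases PySem.List.mem_pyRange_one.mp hj with ⟨h0, h1⟩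
  subst hpj; exact ⟨h0, h1, rfl⟩

theorem pairsOf_mem_of_lt {l : List Int} {j : Nat} (hj : j < l.length) :
    (-(PySem.List.pyGetD l (j : Int) 0), (j : Int)) ∈ pairsOf l := by
  apply List.mem_map.mpr
  exact ⟨(j : Int), PySem.List.mem_pyRange_one.mpr ⟨by positivity, by exact_mod_cast hj⟩, rfl⟩

theorem map_snd_pairsOf (l : List Int) :
    (pairsOf l).map (fun p => p.2) = PySem.List.pyRange 0 (l.length : Int) := by
  simp [pairsOf, List.map_map, Function.comp_def]

theorem length_pairsOf (l : List Int) : (pairsOf l).length = l.length := by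
  simp [pairsOf, PySem.List.length_pyRange_one]

theorem snds_nodup {l : List Int} {pairs : List (Int × Int)} (h : SInv l pairs) :
    (pairs.map (fun p => p.2)).Nodup := by
  have : (pairs.map (fun p => p.2)).Perm ((pairsOf l).map (fun p => p.2)) := h.2.map _
  rw [this.nodup_iff, map_snd_pairsOf]
  exact PySem.List.nodup_pyRange_one 0 _

theorem length_pairs {l : List Int} {pairs : List (Int × Int)} (h : SInv l pairs) :
    pairs.length = l.length := by
  rw [h.2.length_eq, length_pairsOf]

theorem sum_set (l : List Int) (n : Nat) (v : Int) (h : n < l.length) :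
    (l.set n v).sum = l.sum - l[n] + v := by
  induction l generalizing n with
  | nil => simp at h
  | cons x xs ih =>
    cases n with
    | zero => simp [List.set]; ring
    | succ n =>
      simp only [List.set, List.sum_cons]
      rw [ih n (by simpa using h)]
      simp; ring

-- ===== stability of Python's reverse sort over a strictly increasing index list =====
theorem insertBy_stable (l : List Int) (x : Int) :
    ∀ ss : List Int,
      ss.Pairwise (fun a b => pairLt (-(PySem.List.pyGetD l a 0), a) (-(PySem.List.pyGetD l b 0), b) = true) →
      (∀ y ∈ ss, y < x) →
      (PySem.List.insertBy (fun a b => decide ((fun i => PySem.List.pyGetD l i 0) b < (fun i => PySem.List.pyGetD l i 0) a)) x ss).Pairwise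
        (fun a b => pairLt (-(PySem.List.pyGetD l a 0), a) (-(PySem.List.pyGetD l b 0), b) = true) := by
  intro ss
  induction ss with
  | nil => intro _ _; simp [PySem.List.insertBy]
  | cons y ys ih =>
    intro hp hlt
    rcases List.pairwise_cons.mp hp with ⟨hy, hys⟩
    rw [PySem.List.insertBy]
    split
    · rename_i hyx
      simp only [decide_eq_true_eq] at hyx
      refine List.pairwise_cons.mpr ⟨?_, hp⟩
      intro z hz
      rcases List.mem_cons.mp hz with hz | hz
      · subst hz; rw [pairLt_iff]; left; simpa using hyx
      · exact pairLt_trans (by rw [pairLt_iff]; left; simpa using hyx) (hy z hz)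
    · rename_i hyx
      simp only [decide_eq_true_eq, not_lt] at hyx
      refine List.pairwise_cons.mpr ⟨?_, ih hys (fun z hz => hlt z (by simp [hz]))⟩
      intro z hz
      rcases (PySem.List.mem_insertBy _ _ _ _).mp hz with hz | hz
      · subst hz
        rw [pairLt_iff]
        rcases lt_or_eq_of_le hyx with h' | h'
        · left; simpa using h'
        · right; exact ⟨by simpa using h'.symm, hlt y (by simp)⟩
      · exact hy z hz

theorem sorted_rev_stable (l : List Int) :
    ∀ xs : List Int, xs.Pairwise (fun a b => a < b) →
      (PySem.List.sorted xs (fun i => PySem.List.pyGetD l i 0) true).Pairwise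
        (fun a b => pairLt (-(PySem.List.pyGetD l a 0), a) (-(PySem.List.pyGetD l b 0), b) = true) := by
  intro xs
  induction xs using List.reverseRecOn with
  | nil => intro _; simp [PySem.List.sorted]
  | append_singleton xs x ih =>
    intro hp
    have hxs : xs.Pairwise (fun a b => a < b) := (List.pairwise_append.mp hp).1
    have hlt : ∀ y ∈ xs, y < x := by
      intro y hy
      exact (List.pairwise_append.mp hp).2.2 y hy x (by simp)
    rw [PySem.List.sorted_rev_eq_foldl_insertBy, List.foldl_append]
    rw [← PySem.List.sorted_rev_eq_foldl_insertBy]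
    simp only [List.foldl_cons, List.foldl_nil]
    apply insertBy_stable
    · exact ih hxs
    · intro y hy
      exact hlt y ((PySem.List.mem_sorted _ _ _ _).mp hy)

-- A's nlargest sort equals the index projection of B's sorted pair list
theorem sorted_eq_map_snd {l : List Int} {pairs : List (Int × Int)} (h : SInv l pairs) :
    PySem.List.sorted (PySem.List.pyRange 0 (l.length : Int)) (fun i => PySem.List.pyGetD l i 0) true
      = pairs.map (fun p => p.2) := by
  have hs1 := sorted_rev_stable l (PySem.List.pyRange 0 (l.length : Int))
    (PySem.List.pairwise_lt_pyRange_one 0 _)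
  have hmem : ∀ p ∈ pairs, p.1 = -(PySem.List.pyGetD l p.2 0) :=
    fun p hp => (mem_pairsOf (h.2.subset hp)).2.2
  have hs2 : (pairs.map (fun p => p.2)).Pairwise
      (fun a b => pairLt (-(PySem.List.pyGetD l a 0), a) (-(PySem.List.pyGetD l b 0), b) = true) := by
    rw [List.pairwise_map]
    refine h.1.imp_of_mem ?_
    intro p q hp hq hlt
    have e1 := hmem p hp
    have e2 := hmem q hq
    have h' : pairLt (p.1, p.2) (q.1, q.2) = true := by simpa using hlt
    simpa [← e1, ← e2] using h'
  have hperm : (PySem.List.sorted (PySem.List.pyRange 0 (l.length : Int))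
      (fun i => PySem.List.pyGetD l i 0) true).Perm (pairs.map (fun p => p.2)) := by
    refine (PySem.List.sorted_perm _ _ _).trans ?_
    have h' := (h.2.map (fun p => p.2)).symm
    rwa [map_snd_pairsOf] at h'
  exact pairwise_perm_eq (fun a b h1 h2 => pairLt_asymm h1 h2) hperm hs1 hs2

-- max / index of A's odd first pass, read off the head of B's sorted pair list
theorem head_max {l : List Int} {p1 : Int × Int} {rest : List (Int × Int)}
    (h : SInv l (p1 :: rest)) :
    PySem.List.max? l (fun x => x) = some (-p1.1) ∧
    PySem.List.index? l (-p1.1) = some p1.2.toNat ∧ 0 ≤ p1.2 ∧ p1.2 < (l.length : Int) ∧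
    PySem.List.pyGetD l p1.2 0 = -p1.1 := by
  obtain ⟨h0, h1, hval⟩ := mem_pairsOf (h.2.subset (List.mem_cons_self))
  have hg : PySem.List.pyGetD l p1.2 0 = -p1.1 := by omega
  have hlen : p1.2.toNat < l.length := by omega
  have hgetelem : l[p1.2.toNat] = -p1.1 := by
    rw [← PySem.List.pyGetD_eq_getElem l 0 h0 h1]; exact hg
  have hvmem : -p1.1 ∈ l := hgetelem ▸ List.getElem_mem hlen
  have hgj : ∀ (j : Nat), (hj : j < l.length) → PySem.List.pyGetD l (j : Int) 0 = l[j] := by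
    intro j hj
    rw [PySem.List.pyGetD_eq_getElem l 0 (by positivity) (by exact_mod_cast hj)]
    simp
  have hmax : ∀ y ∈ l, y ≤ -p1.1 := by
    intro y hy
    obtain ⟨j, hj, rfl⟩ := List.mem_iff_getElem.mp hy
    have hjmem : (-(PySem.List.pyGetD l (j : Int) 0), (j : Int)) ∈ p1 :: rest :=
      h.2.mem_iff.mpr (pairsOf_mem_of_lt hj)
    rcases List.mem_cons.mp hjmem with hq | hq
    · have h' : -(PySem.List.pyGetD l (j : Int) 0) = p1.1 := congrArg Prod.fst hq
      rw [hgj j hj] at h'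
      omega
    · have hlt := (List.pairwise_cons.mp h.1).1 _ hq
      rw [pairLt_iff] at hlt
      rw [hgj j hj] at hlt
      rcases hlt with h' | h' <;> [skip; skip] <;> dsimp at h' <;> omega
  have hmaxeq : PySem.List.max? l (fun x => x) = some (-p1.1) := by
    cases hm : PySem.List.max? l (fun x => x) with
    | none =>
      rw [PySem.List.max?_eq_none_iff] at hm
      rw [hm] at hvmem
      simp at hvmem
    | some m =>
      have hle1 : -p1.1 ≤ m := PySem.List.max?_isMax hm (-p1.1) hvmem
      have hle2 : m ≤ -p1.1 := hmax m (PySem.List.max?_mem hm)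
      rw [le_antisymm hle2 hle1]
  have hidx : PySem.List.index? l (-p1.1) = some p1.2.toNat := by
    have hsome : (PySem.List.index? l (-p1.1)).isSome := (PySem.List.index?_isSome_iff l _).mpr hvmem
    obtain ⟨k, hk⟩ := Option.isSome_iff_exists.mp hsome
    obtain ⟨hklen, hkval, hmin⟩ := PySem.List.getElem_of_index?_eq_some hk
    have hkmem : (-(PySem.List.pyGetD l (k : Int) 0), (k : Int)) ∈ p1 :: rest :=
      h.2.mem_iff.mpr (pairsOf_mem_of_lt hklen)
    rcases List.mem_cons.mp hkmem with hq | hq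
    · have h' : (k : Int) = p1.2 := congrArg Prod.snd hq
      rw [hk]
      congr 1
      omega
    · exfalso
      have hlt := (List.pairwise_cons.mp h.1).1 _ hq
      rw [pairLt_iff] at hlt
      rw [hgj k hklen, hkval] at hlt
      have hjlt : p1.2.toNat < k := by dsimp at hlt; omega
      exact hmin p1.2.toNat hjlt hgetelem
  exact ⟨hmaxeq, hidx, h0, h1, hg⟩

-- pairsOf after one in-range write, as a pointwise map
theorem pairsOf_set (l : List Int) (i w : Int) (h0 : 0 ≤ i) (h1 : i < (l.length : Int)) :
    pairsOf (PySem.List.pySetD l i w)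
      = (pairsOf l).map (fun p => if p.2 = i then (-w, i) else p) := by
  unfold pairsOf
  rw [PySem.List.pySetD_of_nonneg l w h0, List.map_map]
  have hlen : ((l.set i.toNat w).length : Int) = (l.length : Int) := by simp
  rw [hlen]
  apply List.map_congr_left
  intro j hj
  rcases PySem.List.mem_pyRange_one.mp hj with ⟨hj0, hj1⟩
  have hjn : j.toNat < l.length := by omega
  have hjv : PySem.List.pyGetD (l.set i.toNat w) j 0 = (l.set i.toNat w)[j.toNat]'(by simpa using hjn) :=
    PySem.List.pyGetD_eq_getElem _ 0 hj0 (by simpa using hj1)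
  have hset : (l.set i.toNat w)[j.toNat]'(by simpa using hjn) = if i.toNat = j.toNat then w else l[j.toNat] :=
    List.getElem_set _
  simp only [Function.comp_apply, hjv, hset]
  by_cases hji : j = i
  · subst hji
    simp
  · have hne : i.toNat ≠ j.toNat := by omega
    rw [if_neg hne, if_neg hji, PySem.List.pyGetD_eq_getElem l 0 hj0 hj1]

theorem sum_pySetD_dec (l : List Int) (i : Int) (h0 : 0 ≤ i) (h1 : i < (l.length : Int)) :
    (PySem.List.pySetD l i (PySem.List.pyGetD l i 0 - 1)).sum = l.sum - 1 := by
  have hlen : i.toNat < l.length := by omega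
  rw [PySem.List.pySetD_of_nonneg l _ h0, sum_set l i.toNat _ hlen,
    PySem.List.pyGetD_eq_getElem l 0 h0 h1]
  ring

theorem snd_ne_of_nodup {p1 : Int × Int} {rest : List (Int × Int)}
    (h : ((p1 :: rest).map (fun p => p.2)).Nodup) : ∀ p ∈ rest, p.2 ≠ p1.2 := by
  intro p hp hcon
  rw [List.map_cons, List.nodup_cons] at h
  exact h.1 (hcon ▸ List.mem_map_of_mem hp)

-- one decrement of an in-range entry, on both sides of the invariant
theorem inv_step1 {l : List Int} {p1 : Int × Int} {rest : List (Int × Int)}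
    (h : SInv l (p1 :: rest)) :
    SInv (PySem.List.pySetD l p1.2 (PySem.List.pyGetD l p1.2 0 - 1)) (insortP (p1.1 + 1, p1.2) rest) ∧
    (PySem.List.pySetD l p1.2 (PySem.List.pyGetD l p1.2 0 - 1)).sum = l.sum - 1 ∧
    (PySem.List.pySetD l p1.2 (PySem.List.pyGetD l p1.2 0 - 1)).length = l.length := by
  obtain ⟨h0, h1, hval⟩ := mem_pairsOf (h.2.subset (List.mem_cons_self))
  have hrest_ne : ∀ p ∈ rest, p.2 ≠ p1.2 := snd_ne_of_nodup (snds_nodup h)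
  refine ⟨⟨?_, ?_⟩, sum_pySetD_dec l p1.2 h0 h1, PySem.List.length_pySetD l _ _⟩
  · apply insortP_pairwise _ _ (List.pairwise_cons.mp h.1).2
    intro y hy hcon
    exact hrest_ne y hy (by rw [hcon])
  · rw [pairsOf_set l p1.2 _ h0 h1]
    have hgp1 : (if p1.2 = p1.2 then (-(PySem.List.pyGetD l p1.2 0 - 1), p1.2) else p1) = (p1.1 + 1, p1.2) := by
      rw [if_pos rfl, Prod.ext_iff]
      constructor
      · dsimp; omega
      · rfl
    have hmapr : rest.map (fun p => if p.2 = p1.2 then (-(PySem.List.pyGetD l p1.2 0 - 1), p1.2) else p) = rest := by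
      rw [List.map_congr_left (fun p hp => if_neg (hrest_ne p hp))]
      simp
    refine (insortP_perm _ _).trans ?_
    have hm := h.2.map (fun p => if p.2 = p1.2 then (-(PySem.List.pyGetD l p1.2 0 - 1), p1.2) else p)
    rw [List.map_cons, hgp1, hmapr] at hm
    exact hm

-- the two decrements of a regular pass, on both sides of the invariant
theorem inv_step2 {l : List Int} {p1 p2 : Int × Int} {rest : List (Int × Int)}
    (h : SInv l (p1 :: p2 :: rest)) :
    SInv ((PySem.List.pySetD (PySem.List.pySetD l p1.2 (PySem.List.pyGetD l p1.2 0 - 1)) p2.2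
          (PySem.List.pyGetD (PySem.List.pySetD l p1.2 (PySem.List.pyGetD l p1.2 0 - 1)) p2.2 0 - 1)))
        (insortP (p2.1 + 1, p2.2) (insortP (p1.1 + 1, p1.2) rest)) ∧
    ((PySem.List.pySetD (PySem.List.pySetD l p1.2 (PySem.List.pyGetD l p1.2 0 - 1)) p2.2
          (PySem.List.pyGetD (PySem.List.pySetD l p1.2 (PySem.List.pyGetD l p1.2 0 - 1)) p2.2 0 - 1))).sum = l.sum - 2 ∧
    ((PySem.List.pySetD (PySem.List.pySetD l p1.2 (PySem.List.pyGetD l p1.2 0 - 1)) p2.2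
          (PySem.List.pyGetD (PySem.List.pySetD l p1.2 (PySem.List.pyGetD l p1.2 0 - 1)) p2.2 0 - 1))).length = l.length := by
  obtain ⟨h10, h11, hval1⟩ := mem_pairsOf (h.2.subset (List.mem_cons_self))
  obtain ⟨h20, h21, hval2⟩ := mem_pairsOf (h.2.subset (List.mem_cons_of_mem _ List.mem_cons_self))
  have hnd := snds_nodup h
  have h12 : p1.2 ≠ p2.2 := by
    have h' := hnd
    rw [List.map_cons, List.map_cons, List.nodup_cons] at h'
    intro hcon
    exact h'.1 (by rw [hcon]; exact List.mem_cons_self)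
  have hrest1 : ∀ p ∈ rest, p.2 ≠ p1.2 := by
    have hsub : ((p1 :: rest).map (fun p => p.2)).Sublist (((p1 :: p2 :: rest)).map (fun p => p.2)) :=
      ((List.sublist_cons_self p2 rest).cons₂ p1).map _
    exact snd_ne_of_nodup (hnd.sublist hsub)
  have hrest2 : ∀ p ∈ rest, p.2 ≠ p2.2 := by
    have hsub : ((p2 :: rest).map (fun p => p.2)).Sublist (((p1 :: p2 :: rest)).map (fun p => p.2)) :=
      (List.sublist_cons_self p1 (p2 :: rest)).map _
    exact snd_ne_of_nodup (hnd.sublist hsub)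
  -- the intermediate list
  have hlenm : (PySem.List.pySetD l p1.2 (PySem.List.pyGetD l p1.2 0 - 1)).length = l.length :=
    PySem.List.length_pySetD l _ _
  have hread2 : PySem.List.pyGetD (PySem.List.pySetD l p1.2 (PySem.List.pyGetD l p1.2 0 - 1)) p2.2 0
      = PySem.List.pyGetD l p2.2 0 := by
    rw [PySem.List.pySetD_of_nonneg l _ h10]
    have hb : p2.2 < ((l.set p1.2.toNat (PySem.List.pyGetD l p1.2 0 - 1)).length : Int) := by simpa using h21
    rw [PySem.List.pyGetD_eq_getElem _ 0 h20 hb, List.getElem_set, if_neg (by omega),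
      PySem.List.pyGetD_eq_getElem l 0 h20 h21]
  have h21' : p2.2 < ((PySem.List.pySetD l p1.2 (PySem.List.pyGetD l p1.2 0 - 1)).length : Int) := by
    rw [hlenm]; exact h21
  refine ⟨⟨?_, ?_⟩, ?_, by rw [PySem.List.length_pySetD, hlenm]⟩
  · -- sortedness of the new pair list
    have hp_rest : rest.Pairwise (fun a b => pairLt a b = true) :=
      (List.pairwise_cons.mp (List.pairwise_cons.mp h.1).2).2
    have hin : (insortP (p1.1 + 1, p1.2) rest).Pairwise (fun a b => pairLt a b = true) := by
      apply insortP_pairwise _ _ hp_rest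
      intro y hy hcon
      exact hrest1 y hy (by rw [hcon])
    apply insortP_pairwise _ _ hin
    intro y hy hcon
    rcases List.mem_cons.mp ((insortP_perm _ _).mem_iff.mp hy) with hy' | hy'
    · rw [hy'] at hcon
      exact h12 (by simpa using congrArg Prod.snd hcon)
    · exact hrest2 y hy' (by rw [hcon])
  · -- permutation with pairsOf of the updated list
    rw [pairsOf_set _ p2.2 _ h20 h21', hread2, pairsOf_set l p1.2 _ h10 h11]
    have hm := (h.2.map (fun p => if p.2 = p1.2 then (-(PySem.List.pyGetD l p1.2 0 - 1), p1.2) else p)).map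
      (fun p => if p.2 = p2.2 then (-(PySem.List.pyGetD l p2.2 0 - 1), p2.2) else p)
    rw [List.map_cons, List.map_cons, List.map_cons, List.map_cons] at hm
    have e1 : (if p1.2 = p1.2 then (-(PySem.List.pyGetD l p1.2 0 - 1), p1.2) else p1) = (p1.1 + 1, p1.2) := by
      rw [if_pos rfl, Prod.ext_iff]
      exact ⟨by dsimp; omega, rfl⟩
    have e2 : (if ((p1.1 + 1, p1.2) : Int × Int).2 = p2.2 then (-(PySem.List.pyGetD l p2.2 0 - 1), p2.2) else (p1.1 + 1, p1.2)) = (p1.1 + 1, p1.2) :=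
      if_neg h12
    have e3 : (if p2.2 = p1.2 then (-(PySem.List.pyGetD l p1.2 0 - 1), p1.2) else p2) = p2 :=
      if_neg (Ne.symm h12)
    have e4 : (if p2.2 = p2.2 then (-(PySem.List.pyGetD l p2.2 0 - 1), p2.2) else p2) = (p2.1 + 1, p2.2) := by
      rw [if_pos rfl, Prod.ext_iff]
      exact ⟨by dsimp; omega, rfl⟩
    have e5 : rest.map (fun p => if p.2 = p1.2 then (-(PySem.List.pyGetD l p1.2 0 - 1), p1.2) else p) = rest := by
      rw [List.map_congr_left (fun p hp => if_neg (hrest1 p hp))]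
      simp
    have e6 : rest.map (fun p => if p.2 = p2.2 then (-(PySem.List.pyGetD l p2.2 0 - 1), p2.2) else p) = rest := by
      rw [List.map_congr_left (fun p hp => if_neg (hrest2 p hp))]
      simp
    rw [e1, e2, e3, e4, e5, e6] at hm
    refine ((insortP_perm _ _).trans ?_)
    refine (List.Perm.cons _ (insortP_perm _ _)).trans ?_
    refine (List.Perm.swap _ _ _).trans hm
  · -- the sum drops by exactly 2
    have hs1 : (PySem.List.pySetD l p1.2 (PySem.List.pyGetD l p1.2 0 - 1)).sum = l.sum - 1 :=
      sum_pySetD_dec l p1.2 h10 h11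
    have hs2 := sum_pySetD_dec (PySem.List.pySetD l p1.2 (PySem.List.pyGetD l p1.2 0 - 1)) p2.2 h20 h21'
    rw [hs2, hs1]
    ring

theorem foldl_insort_inv : ∀ (xs acc : List (Int × Int)),
    acc.Pairwise (fun a b => pairLt a b = true) →
    ((acc ++ xs).map (fun p => p.2)).Nodup →
    (xs.foldl (fun acc p => insortP p acc) acc).Pairwise (fun a b => pairLt a b = true) ∧
    (xs.foldl (fun acc p => insortP p acc) acc).Perm (acc ++ xs) := by
  intro xs
  induction xs with
  | nil =>
    intro acc hp _
    rw [List.foldl_nil, List.append_nil]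
    exact ⟨hp, List.Perm.refl _⟩
  | cons x xs ih =>
    intro acc hp hnd
    have hxne : ∀ y ∈ acc, y ≠ x := by
      intro y hy hcon
      rw [List.map_append] at hnd
      rcases List.nodup_append.mp hnd with ⟨_, _, hdisj⟩
      exact hdisj y.2 (List.mem_map_of_mem hy) x.2 (by simp) (by rw [hcon])
    have hperm1 : (insortP x acc).Perm (x :: acc) := insortP_perm x acc
    have hp2 : (insortP x acc ++ xs).Perm (acc ++ x :: xs) := by
      refine (hperm1.append_right xs).trans ?_
      exact List.perm_middle.symm
    have hacc' := insortP_pairwise x acc hp hxne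
    have hnd' : ((insortP x acc ++ xs).map (fun p => p.2)).Nodup :=
      ((hp2.map _).nodup_iff).mpr hnd
    obtain ⟨hP, hQ⟩ := ih (insortP x acc) hacc' hnd'
    exact ⟨hP, hQ.trans hp2⟩

theorem build_inv (l : List Int) : SInv l (altBuild l) := by
  have hb : altBuild l = (pairsOf l).foldl (fun acc p => insortP p acc) [] := by
    unfold altBuild pairsOf
    rw [PySem.List.enumerate_eq_map_pyRange l 0, List.foldl_map, List.foldl_map]
    rfl
  rw [hb]
  obtain ⟨hP, hQ⟩ := foldl_insort_inv (pairsOf l) [] (by simp)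
    (by simpa [map_snd_pairsOf] using PySem.List.nodup_pyRange_one 0 (l.length : Int))
  exact ⟨hP, by simpa using hQ⟩

-- string side: ' '.join
theorem join_nil' : PySem.Str.join " " [] = "" := by
  simp [PySem.Str.join, PySem.Chars.join_nil]

theorem join_singleton' (c : String) : PySem.Str.join " " [c] = c := by
  simp [PySem.Str.join, PySem.Chars.join_singleton, String.ofList_toList]

theorem join_cons_cons' (a b : String) (r : List String) :
    PySem.Str.join " " (a :: b :: r) = a ++ " " ++ PySem.Str.join " " (b :: r) := by
  simp only [PySem.Str.join, List.map_cons, PySem.Chars.join_cons_cons, String.ofList_append,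
    String.ofList_toList]

theorem join_snoc (chunks : List String) (c : String) (h : chunks ≠ []) :
    PySem.Str.join " " (chunks ++ [c]) = PySem.Str.join " " chunks ++ " " ++ c := by
  induction chunks with
  | nil => exact absurd rfl h
  | cons a t ih =>
    cases t with
    | nil =>
      rw [List.cons_append, List.nil_append, join_cons_cons', join_singleton', join_singleton']
    | cons b r =>
      simp only [List.cons_append] at ih ⊢
      rw [join_cons_cons', ih (by simp), join_cons_cons']
      simp [String.append_assoc]

theorem genEvacLoop_nonpos {fuel : Nat} {l : List Int} {plan : String} {first : Bool}
    (h : l.sum ≤ 0) : genEvacLoop fuel l plan first = plan := by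
  cases fuel <;> simp [genEvacLoop, not_lt.mpr h]

theorem altLoop_nonpos {fuel : Nat} {pairs : List (Int × Int)} {chunks : List String} {s : Int}
    (h : s ≤ 0) : altLoop fuel pairs chunks s = chunks := by
  cases fuel <;> simp [altLoop, not_lt.mpr h]

-- one regular pass of A's loop, with its branch conditions discharged
theorem genEvacLoop_step_even (fA : Nat) (l : List Int) (plan : String) (first : Bool)
    (hpos : l.sum > 0) (hodd : isSumOdd l = false) (i1 i2 : Int)
    (hsorted : (PySem.List.sorted (PySem.List.pyRange 0 (l.length : Int))
      (fun i => PySem.List.pyGetD l i 0) true).take 2 = [i1, i2]) :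
    genEvacLoop (fA + 1) l plan first
      = genEvacLoop fA
          (PySem.List.pySetD (PySem.List.pySetD l i1 (PySem.List.pyGetD l i1 0 - 1)) i2
            (PySem.List.pyGetD (PySem.List.pySetD l i1 (PySem.List.pyGetD l i1 0 - 1)) i2 0 - 1))
          (plan ++ ((if first then "" else " ") ++ getPartyCode i1 ++ getPartyCode i2)) false := by
  conv_lhs => rw [genEvacLoop]
  rw [if_pos hpos, hodd, hsorted]
  simp

-- the odd first pass of A's loop
theorem genEvacLoop_step_odd (fA : Nat) (l : List Int) (plan : String)
    (hpos : l.sum > 0) (hodd : isSumOdd l = true) (v : Int) (k : Nat)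
    (hmax : PySem.List.max? l (fun x => x) = some v)
    (hidx : PySem.List.index? l v = some k) :
    genEvacLoop (fA + 1) l plan true
      = genEvacLoop fA (PySem.List.pySetD l (k : Int) (PySem.List.pyGetD l (k : Int) 0 - 1))
          (plan ++ getPartyCode (k : Int)) false := by
  conv_lhs => rw [genEvacLoop]
  rw [if_pos hpos, hodd]
  rw [PySem.List.index?_eq_idxOf?] at hidx
  simp [hmax, hidx]

-- one pass of B's loop
theorem altLoop_step (fB : Nat) (nv1 i1 nv2 i2 : Int) (rest : List (Int × Int))
    (chunks : List String) (s : Int) (hpos : s > 0) :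
    altLoop (fB + 1) ((nv1, i1) :: (nv2, i2) :: rest) chunks s
      = altLoop fB (insortP (nv2 + 1, i2) (insortP (nv1 + 1, i1) rest))
          (chunks ++ [String.singleton (Char.ofNat (65 + i1).toNat) ++ String.singleton (Char.ofNat (65 + i2).toNat)])
          (s - 2) := by
  conv_lhs => rw [altLoop]
  rw [if_pos hpos]

-- even sum means A's odd branch is off
theorem isSumOdd_false {l : List Int} {s : Int} (hs : s = l.sum) (hmod : s % 2 = 0) :
    isSumOdd l = false := by
  unfold isSumOdd
  rw [PySem.Int.mod_eq_emod_of_pos (by norm_num), ← hs, hmod]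
  rfl

-- the string bookkeeping of one pass
theorem plan_snoc (chunks : List String) (first : Bool) (c1 c2 : String)
    (hft : first = true → chunks = []) (hff : first = false → chunks ≠ []) :
    PySem.Str.join " " chunks ++ ((if first then "" else " ") ++ c1 ++ c2)
      = PySem.Str.join " " (chunks ++ [c1 ++ c2]) := by
  cases first with
  | true =>
    rw [hft rfl, join_nil', List.nil_append, join_singleton', if_pos rfl]
    simp [String.empty_append]
  | false =>
    rw [join_snoc chunks (c1 ++ c2) (hff rfl), if_neg (by simp)]
    simp [String.append_assoc]

-- the two while-loops agree, pass for pass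
theorem loop_eq : ∀ (fA fB : Nat) (l : List Int) (pairs : List (Int × Int))
    (chunks : List String) (s : Int) (first : Bool),
    SInv l pairs → s = l.sum → s.toNat ≤ fA → s.toNat ≤ fB → s % 2 = 0 →
    (first = true → chunks = []) → (first = false → chunks ≠ []) →
    (2 ≤ l.length ∨ s ≤ 0) →
    genEvacLoop fA l (PySem.Str.join " " chunks) first
      = PySem.Str.join " " (altLoop fB pairs chunks s) := by
  intro fA
  induction fA with
  | zero =>
    intro fB l pairs chunks s first hinv hs hfa hfb hmod hft hff hlen
    have hs0 : s ≤ 0 := by omega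
    rw [altLoop_nonpos hs0]
    rfl
  | succ fA ih =>
    intro fB l pairs chunks s first hinv hs hfa hfb hmod hft hff hlen
    by_cases hpos : 0 < s
    · have hs2 : 2 ≤ s := by omega
      have hlen2 : 2 ≤ l.length := by
        rcases hlen with h' | h'
        · exact h'
        · omega
      obtain ⟨p1, p2, rest, rfl⟩ : ∃ p1 p2 rest, pairs = p1 :: p2 :: rest := by
        rcases pairs with _ | ⟨p1, t⟩
        · exfalso
          have h' := length_pairs hinv
          simp at h'
          omega
        · rcases t with _ | ⟨p2, rest⟩
          · exfalso
            have h' := length_pairs hinv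
            simp at h'
            omega
          · exact ⟨p1, p2, rest, rfl⟩
      obtain ⟨nv1, i1⟩ := p1
      obtain ⟨nv2, i2⟩ := p2
      cases fB with
      | zero => exfalso; omega
      | succ fB =>
        have hsumpos : l.sum > 0 := by omega
        have hsorted : (PySem.List.sorted (PySem.List.pyRange 0 (l.length : Int))
            (fun i => PySem.List.pyGetD l i 0) true).take 2 = [i1, i2] := by
          rw [sorted_eq_map_snd hinv]
          simp
        rw [genEvacLoop_step_even fA l _ first hsumpos (isSumOdd_false hs hmod) i1 i2 hsorted,
          altLoop_step fB nv1 i1 nv2 i2 rest chunks s hpos]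
        obtain ⟨hinv2, hsum2, hlen2'⟩ := inv_step2 (l := l) (p1 := (nv1, i1)) (p2 := (nv2, i2)) hinv
        dsimp only at hinv2 hsum2 hlen2'
        have hplan := plan_snoc chunks first
          (String.singleton (Char.ofNat (65 + i1).toNat)) (String.singleton (Char.ofNat (65 + i2).toNat)) hft hff
        simp only [getPartyCode]
        rw [hplan]
        exact ih fB _ _ _ (s - 2) false hinv2 (by omega) (by omega) (by omega) (by omega)
          (by simp) (by simp) (Or.inl (by rw [hlen2']; exact hlen2))
    · have hs0 : s ≤ 0 := by omega
      rw [genEvacLoop_nonpos (by omega), altLoop_nonpos hs0]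

-- ===== VERDICT (by name: the statement is the Claim_ definition above) =====
theorem sum_odd_bool {l : List Int} (hmod : ¬ l.sum % 2 = 0) : isSumOdd l = true := by
  unfold isSumOdd
  rw [PySem.Int.mod_eq_emod_of_pos (by norm_num)]
  simp [hmod]

theorem genEvacuationPlan_spec : Claim_equal_genEvacuationPlan := by
  intro l hdom hpre
  unfold Spec_genEvacuationPlan genEvacuationPlan genEvacuationPlan_alt
  by_cases hpos : 0 < l.sum
  · by_cases hmod : l.sum % 2 = 0
    · -- even total: the odd pre-step of neither side fires
      have hcond : (decide (l.sum > 0) && (PySem.Int.mod l.sum 2 != 0)) = false := by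
        rw [PySem.Int.mod_eq_emod_of_pos (by norm_num), hmod]
        simp
      rw [hcond]
      simp only [Bool.false_eq_true, if_false]
      have hlen2 : 2 ≤ l.length ∨ l.sum ≤ 0 := by
        rcases hpre with h' | h'
        · exact Or.inl h'
        · exfalso; omega
      have happ := loop_eq l.sum.toNat l.sum.toNat l (altBuild l) [] l.sum true
        (build_inv l) rfl le_rfl le_rfl hmod (fun _ => rfl) (fun hf => by simp at hf) hlen2
      rw [join_nil'] at happ
      exact happ
    · -- odd total: both sides do the single odd pre-step first
      have hcond : (decide (l.sum > 0) && (PySem.Int.mod l.sum 2 != 0)) = true := by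
        rw [PySem.Int.mod_eq_emod_of_pos (by norm_num)]
        simp [hpos, hmod]
      obtain ⟨p1, rest, haltb⟩ : ∃ p1 rest, altBuild l = p1 :: rest := by
        have hlen := length_pairs (build_inv l)
        rcases hb : altBuild l with _ | ⟨p1, rest⟩
        · exfalso
          rw [hb] at hlen
          rcases l with _ | ⟨x, t⟩
          · simp at hpos
          · simp at hlen
        · exact ⟨p1, rest, rfl⟩
      have hinv := build_inv l
      rw [haltb] at hinv
      obtain ⟨hmax, hidx, hi0, hi1, hgi⟩ := head_max hinv
      obtain ⟨hinv1, hsum1, hlen1⟩ := inv_step1 hinv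
      obtain ⟨nv, i⟩ := p1
      dsimp only at hmax hidx hi0 hi1 hgi hinv1 hsum1 hlen1
      have hcast : ((i.toNat : Nat) : Int) = i := Int.toNat_of_nonneg hi0
      have hfuel : l.sum.toNat = (l.sum - 1).toNat + 1 := by omega
      rw [hfuel, genEvacLoop_step_odd (l.sum - 1).toNat l "" hpos (sum_odd_bool hmod) (-nv) i.toNat hmax hidx]
      rw [hcond]
      rw [if_pos rfl]
      rw [haltb]
      have hlend : 2 ≤ (PySem.List.pySetD l i (PySem.List.pyGetD l i 0 - 1)).length ∨ l.sum - 1 ≤ 0 := by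
        rcases hpre with h' | h'
        · exact Or.inl (by rw [hlen1]; exact h')
        · exact Or.inr (by omega)
      have happ := loop_eq (l.sum - 1).toNat (l.sum - 1).toNat
        (PySem.List.pySetD l i (PySem.List.pyGetD l i 0 - 1)) (insortP (nv + 1, i) rest)
        [String.singleton (Char.ofNat (65 + i).toNat)] (l.sum - 1) false hinv1
        (by omega) le_rfl le_rfl (by omega) (fun hf => by simp at hf) (fun _ => by simp) hlend
      rw [join_singleton'] at happ
      rw [hcast]
      simp only [getPartyCode, String.empty_append]
      exact happ
  · -- nothing to evacuate: both sides return the empty plan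
    have hcond : (decide (l.sum > 0) && (PySem.Int.mod l.sum 2 != 0)) = false := by
      simp [hpos]
    rw [show l.sum.toNat = 0 from by omega, hcond]
    simp only [Bool.false_eq_true, if_false]
    rw [altLoop_nonpos (by omega), join_nil']
    rfl
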